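-- pv_equiv track=rewrite | github.com/HomericIntelligence/ProjectHephaestus | hephaestus/github/fleet_sync.py | _ci_state
-- ===== SOURCE A (Python) =====
-- from typing import Any
--
-- def _ci_state(checks: list[dict[str, Any]]) -> str:
--     """Reduce a statusCheckRollup list to a single state string."""
--     if not checks:
--         return "UNKNOWN"
--     bad = {"FAILURE", "TIMED_OUT", "CANCELLED", "ACTION_REQUIRED", "ERROR", "failure", "error"}
--     pending = {"PENDING", "IN_PROGRESS", "QUEUED", "WAITING", "pending"}
--     conclusions = {c.get("conclusion") or c.get("state", "PENDING") for c in checks}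
--     if any(c is None for c in (c.get("conclusion") for c in checks)):
--         return "PENDING"
--     if conclusions & bad:
--         return "FAILURE"
--     if conclusions & pending:
--         return "PENDING"
--     return "SUCCESS"
-- ===== SOURCE B (Python) =====
-- _TABLE = ("SUCCESS", "PENDING", "FAILURE", "PENDING")
--
-- def _severity(c) -> int:
--     """Map one check to a severity rank: 3 = missing conclusion, 2 = bad, 1 = pending, 0 = ok."""
--     conc = c.get("conclusion")
--     if conc is None:
--         return 3
--     s = conc or c.get("state", "PENDING")
--     if s in {"FAILURE", "TIMED_OUT", "CANCELLED", "ACTION_REQUIRED", "ERROR", "failure", "error"}: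
--         return 2
--     if s in {"PENDING", "IN_PROGRESS", "QUEUED", "WAITING", "pending"}:
--         return 1
--     return 0
--
-- def _ci_state(checks: list[dict[str, "Any"]]) -> str:
--     """Reduce a statusCheckRollup list to a single state string via a severity lattice."""
--     if not checks:
--         return "UNKNOWN"
--     return _TABLE[max(map(_severity, checks))]
-- ===== Notes on version B (the rewrite author's own statement) =====
-- stated objective: alternative
-- what changed: Replaced the conclusions-set construction and the set intersections / None-scan precedence chain by mapping each check to a numeric severity rank (3=missing conclusion, 2=bad, 1=pending, 0=ok), reducing with max, and indexing a fixed result table with the maximum.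
import Mathlib
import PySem

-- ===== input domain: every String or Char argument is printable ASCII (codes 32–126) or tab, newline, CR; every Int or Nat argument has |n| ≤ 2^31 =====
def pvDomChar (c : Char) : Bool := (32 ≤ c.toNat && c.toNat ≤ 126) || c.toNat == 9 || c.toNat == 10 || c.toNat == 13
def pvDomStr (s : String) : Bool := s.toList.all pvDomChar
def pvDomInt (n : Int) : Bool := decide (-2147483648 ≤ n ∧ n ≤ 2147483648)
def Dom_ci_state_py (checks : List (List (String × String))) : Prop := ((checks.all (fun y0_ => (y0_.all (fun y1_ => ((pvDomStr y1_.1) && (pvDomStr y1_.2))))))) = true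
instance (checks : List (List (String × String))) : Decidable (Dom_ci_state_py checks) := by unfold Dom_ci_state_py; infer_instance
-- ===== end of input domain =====

-- B maps each check to a numeric severity rank, reduces with max and indexes a fixed result
-- table, instead of A's conclusions-set, set intersections and None-scan; same results.

-- ===== PORT A =====
-- the two literal string sets A writes out
def pvBad : PySem.Set String :=
  PySem.Set.ofList ["FAILURE", "TIMED_OUT", "CANCELLED", "ACTION_REQUIRED", "ERROR", "failure", "error"]
def pvPending : PySem.Set String :=
  PySem.Set.ofList ["PENDING", "IN_PROGRESS", "QUEUED", "WAITING", "pending"]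

-- conc or c.get("state", "PENDING")  (None or "" falls through to the right operand)
def pvOrState (conc : Option String) (c : List (String × String)) : String :=
  match conc with
  | some s => if s = "" then (PySem.Dict.ofList c).getD "state" "PENDING" else s
  | none => (PySem.Dict.ofList c).getD "state" "PENDING"

-- c.get("conclusion") or c.get("state", "PENDING")
def pvDerive (c : List (String × String)) : String :=
  pvOrState ((PySem.Dict.ofList c).get? "conclusion") c

def ci_state_py (checks : List (List (String × String))) : String :=
  if checks = [] then "UNKNOWN"
  else
    let conclusions : PySem.Set String := PySem.Set.ofList (checks.map pvDerive)
    if checks.any (fun c => ((PySem.Dict.ofList c).get? "conclusion").isNone) then "PENDING"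
    else if PySem.Set.inter conclusions pvBad ≠ [] then "FAILURE"
    else if PySem.Set.inter conclusions pvPending ≠ [] then "PENDING"
    else "SUCCESS"

-- ===== PORT B =====
-- _TABLE = ("SUCCESS", "PENDING", "FAILURE", "PENDING")
def pvTable : List String := ["SUCCESS", "PENDING", "FAILURE", "PENDING"]

-- _severity(c): 3 = missing conclusion, 2 = bad, 1 = pending, 0 = ok
def pvSeverity (c : List (String × String)) : Int :=
  match (PySem.Dict.ofList c).get? "conclusion" with
  | none => 3
  | some conc =>
    let s := if conc = "" then (PySem.Dict.ofList c).getD "state" "PENDING" else conc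
    if PySem.Set.contains pvBad s then 2
    else if PySem.Set.contains pvPending s then 1
    else 0

def ci_state_py_alt (checks : List (List (String × String))) : String :=
  if checks = [] then "UNKNOWN"
  else
    -- max(map(_severity, checks)); checks ≠ [] so max? is some, and the severity is in 0..3
    -- so the table index never raises: both fallbacks below are unreachable
    match PySem.List.max? (checks.map pvSeverity) (fun x => x) with
    | some m => (PySem.List.pyGet? pvTable m).getD "UNKNOWN"
    | none => "UNKNOWN"

-- ===== PRECONDITION & SPEC =====
def Spec_ci_state_py (checks : List (List (String × String))) (out : String) : Prop := out = ci_state_py_alt checks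
instance (checks : List (List (String × String))) (out : String) : Decidable (Spec_ci_state_py checks out) := by unfold Spec_ci_state_py; infer_instance

-- ===== CLAIM (what is proved, stated in full; the proofs are below) =====
def Claim_equal_ci_state_py : Prop := ∀ (checks : List (List (String × String))), Dom_ci_state_py checks → Spec_ci_state_py checks (ci_state_py checks)

-- ===== LEMMAS AND PROOFS =====

theorem pvSeverity_bounds (c : List (String × String)) : 0 ≤ pvSeverity c ∧ pvSeverity c ≤ 3 := by
  unfold pvSeverity
  rcases hcc : (PySem.Dict.ofList c).get? "conclusion" with _ | s
  · simp [hcc]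
  · simp only [hcc]
    split_ifs <;> simp

-- severity 3 ↔ the conclusion key is missing
theorem pvSeverity_eq_three_iff (c : List (String × String)) :
    pvSeverity c = 3 ↔ ((PySem.Dict.ofList c).get? "conclusion").isNone = true := by
  unfold pvSeverity
  rcases hcc : (PySem.Dict.ofList c).get? "conclusion" with _ | s
  · simp [hcc]
  · simp only [hcc, Option.isNone_some]
    split_ifs <;> simp

-- when the conclusion key is present, severity 2 ↔ derived value is bad
theorem pvSeverity_eq_two_iff (c : List (String × String))
    (h : ((PySem.Dict.ofList c).get? "conclusion").isNone = false) :
    pvSeverity c = 2 ↔ PySem.Set.contains pvBad (pvDerive c) = true := by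
  unfold pvSeverity pvDerive pvOrState
  rcases hcc : (PySem.Dict.ofList c).get? "conclusion" with _ | s
  · rw [hcc] at h; simp at h
  · simp only [hcc]
    split_ifs <;> simp_all

-- when the conclusion key is present, severity 1 ↔ derived is pending and not bad
theorem pvSeverity_eq_one_iff (c : List (String × String))
    (h : ((PySem.Dict.ofList c).get? "conclusion").isNone = false) :
    pvSeverity c = 1 ↔ (PySem.Set.contains pvBad (pvDerive c) = false ∧
      PySem.Set.contains pvPending (pvDerive c) = true) := by
  unfold pvSeverity pvDerive pvOrState
  rcases hcc : (PySem.Dict.ofList c).get? "conclusion" with _ | s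
  · rw [hcc] at h; simp at h
  · simp only [hcc]
    split_ifs <;> simp_all

-- nonempty intersection of set(l) with a set ↔ some element of l is in it
theorem pvInterNe (l s : List String) :
    PySem.Set.inter (PySem.Set.ofList l) s ≠ [] ↔ ∃ x ∈ l, x ∈ s := by
  rw [← List.isEmpty_eq_false_iff, List.isEmpty_eq_false_iff_exists_mem]
  constructor
  · rintro ⟨y, hy⟩
    rw [PySem.Set.mem_inter _ _ _] at hy
    exact ⟨y, (PySem.Set.mem_ofList _ _).mp hy.1, hy.2⟩
  · rintro ⟨x, hx, hs⟩
    exact ⟨x, (PySem.Set.mem_inter _ _ _).mpr ⟨(PySem.Set.mem_ofList _ _).mpr hx, hs⟩⟩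

-- ===== VERDICT (by name: the statement is the Claim_ definition above) =====
theorem ci_state_py_spec : Claim_equal_ci_state_py := by
  intro checks _
  unfold Spec_ci_state_py ci_state_py ci_state_py_alt
  by_cases hnil : checks = []
  · simp [hnil]
  · simp only [hnil, if_false]
    have hne : checks.map pvSeverity ≠ [] := by simp [hnil]
    obtain ⟨m, hm⟩ : ∃ m, PySem.List.max? (checks.map pvSeverity) (fun x => x) = some m := by
      rcases hmm : PySem.List.max? (checks.map pvSeverity) (fun x => x) with _ | m
      · exact absurd ((PySem.List.max?_eq_none_iff _ _).mp hmm) hne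
      · exact ⟨m, rfl⟩
    have hmem : m ∈ checks.map pvSeverity := PySem.List.max?_mem hm
    have hmax : ∀ y ∈ checks.map pvSeverity, y ≤ m := by
      intro y hy; exact PySem.List.max?_isMax hm y hy
    obtain ⟨c0, hc0, hc0m⟩ := List.mem_map.mp hmem
    have hb0 := pvSeverity_bounds c0
    have hmlo : 0 ≤ m := hc0m ▸ hb0.1
    have hmhi : m ≤ 3 := hc0m ▸ hb0.2
    rw [hm]
    by_cases hn : checks.any (fun c => ((PySem.Dict.ofList c).get? "conclusion").isNone) = true
    · -- some conclusion missing: severity 3 present, so m = 3, table gives "PENDING"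
      obtain ⟨c, hc, hcn⟩ := List.any_eq_true.mp hn
      have h3 : pvSeverity c = 3 := (pvSeverity_eq_three_iff c).mpr hcn
      have : (3 : Int) ≤ m := h3 ▸ hmax _ (List.mem_map_of_mem hc)
      have hm3 : m = 3 := le_antisymm hmhi this
      simp [hn, hm3, pvTable, PySem.List.pyGet?, PySem.List.pyIdx?]
    · simp only [hn, if_false]
      simp only [Bool.not_eq_true] at hn
      have hnall : ∀ c ∈ checks, ((PySem.Dict.ofList c).get? "conclusion").isNone = false :=
        fun c hc => by simpa [Option.isNone_eq_false_iff, Option.isSome_iff_ne_none] using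
          List.any_eq_false.mp hn c hc
      -- no severity is 3, so m ≤ 2
      have hm2 : m ≤ 2 := by
        rcases lt_or_eq_of_le hmhi with h | h
        · omega
        · exfalso
          have h3 := (pvSeverity_eq_three_iff c0).mp (by omega : pvSeverity c0 = 3)
          exact Bool.false_ne_true ((hnall c0 hc0) ▸ h3)
      by_cases hb : PySem.Set.inter (PySem.Set.ofList (checks.map pvDerive)) pvBad ≠ []
      · -- some derived in bad: severity 2 present, m ≤ 2 so m = 2, table gives "FAILURE"
        obtain ⟨x, hx, hxs⟩ := (pvInterNe _ _).mp hb
        obtain ⟨c, hc, rfl⟩ := List.mem_map.mp hx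
        have h2 : pvSeverity c = 2 := (pvSeverity_eq_two_iff c (hnall c hc)).mpr
          ((PySem.Set.contains_iff _ _).mpr hxs)
        have : (2 : Int) ≤ m := h2 ▸ hmax _ (List.mem_map_of_mem hc)
        have hm2' : m = 2 := le_antisymm hm2 this
        simp [hb, hm2', pvTable, PySem.List.pyGet?, PySem.List.pyIdx?]
      · simp only [hb, if_false]
        rw [not_not] at hb
        -- no derived is bad, so no severity is 2 (nor 3): m ≤ 1
        have hnobad : ∀ c ∈ checks, PySem.Set.contains pvBad (pvDerive c) = false := by
          intro c hc
          by_contra h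
          simp only [Bool.not_eq_false] at h
          exact ((pvInterNe _ _).mpr ⟨pvDerive c, List.mem_map_of_mem hc,
            (PySem.Set.contains_iff _ _).mp h⟩) hb
        have hm1 : m ≤ 1 := by
          rcases lt_or_eq_of_le hm2 with h | h
          · omega
          · exfalso
            have h2 := (pvSeverity_eq_two_iff c0 (hnall c0 hc0)).mp (by omega : pvSeverity c0 = 2)
            exact Bool.false_ne_true ((hnobad c0 hc0) ▸ h2)
        by_cases hp : PySem.Set.inter (PySem.Set.ofList (checks.map pvDerive)) pvPending ≠ []
        · obtain ⟨x, hx, hxs⟩ := (pvInterNe _ _).mp hp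
          obtain ⟨c, hc, rfl⟩ := List.mem_map.mp hx
          have h1 : pvSeverity c = 1 := (pvSeverity_eq_one_iff c (hnall c hc)).mpr
            ⟨hnobad c hc, (PySem.Set.contains_iff _ _).mpr hxs⟩
          have : (1 : Int) ≤ m := h1 ▸ hmax _ (List.mem_map_of_mem hc)
          have hm1' : m = 1 := le_antisymm hm1 this
          simp [hp, hm1', pvTable, PySem.List.pyGet?, PySem.List.pyIdx?]
        · simp only [hp, if_false]
          rw [not_not] at hp
          have hnopend : ∀ c ∈ checks, PySem.Set.contains pvPending (pvDerive c) = false := by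
            intro c hc
            by_contra h
            simp only [Bool.not_eq_false] at h
            exact absurd ((pvInterNe _ _).mpr ⟨pvDerive c, List.mem_map_of_mem hc,
              (PySem.Set.contains_iff _ _).mp h⟩) (by simpa using hp)
          have hm0 : m = 0 := by
            rcases lt_or_eq_of_le hm1 with h | h
            · omega
            · exfalso
              have h1 := (pvSeverity_eq_one_iff c0 (hnall c0 hc0)).mp (by omega : pvSeverity c0 = 1)
              exact Bool.false_ne_true ((hnopend c0 hc0) ▸ h1.2)
          simp [hm0, pvTable, PySem.List.pyGet?, PySem.List.pyIdx?]
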